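-- pv_equiv track=rewrite | github.com/withNoclout/LeetCode-Med | quiz_largestWordCount_update.py | largestWordCount
-- ===== SOURCE A (Python) =====
-- def largestWordCount(messages, senders):
--     count = {}
--     for msg, sender in zip(messages, senders):
--         count[sender] = count.get(sender, 0) + len(msg.split())
--
--     max_count = max(count.values())
--     ans = ""
--     for sender, c in count.items():
--         if c == max_count:
--             ans = max(ans, sender)
--     return ans
-- ===== SOURCE B (Python) =====
-- def largestWordCount(messages, senders):
--     # One pass: maintain the word-count dict and the running best
--     # (total_words, sender) pair at the same time; counts only grow,
--     # so the running tuple-max is always the answer so far.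
--     count = {}
--     best = None
--     for msg, sender in zip(messages, senders):
--         c = count.get(sender, 0) + len(msg.split())
--         count[sender] = c
--         if best is None or (c, sender) > best:
--             best = (c, sender)
--     if best is None:
--         raise ValueError("no messages")
--     return best[1]
-- ===== Notes on version B (the rewrite author's own statement) =====
-- stated objective: alternative
-- what changed: A builds the sender->words dict, then makes two more passes (max of the values, then a selection loop taking the lexicographically largest sender at that count); B does everything in a single loop that updates the dict and a running (count, sender) tuple maximum, which is valid because a sender's total only grows.
import Mathlib
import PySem

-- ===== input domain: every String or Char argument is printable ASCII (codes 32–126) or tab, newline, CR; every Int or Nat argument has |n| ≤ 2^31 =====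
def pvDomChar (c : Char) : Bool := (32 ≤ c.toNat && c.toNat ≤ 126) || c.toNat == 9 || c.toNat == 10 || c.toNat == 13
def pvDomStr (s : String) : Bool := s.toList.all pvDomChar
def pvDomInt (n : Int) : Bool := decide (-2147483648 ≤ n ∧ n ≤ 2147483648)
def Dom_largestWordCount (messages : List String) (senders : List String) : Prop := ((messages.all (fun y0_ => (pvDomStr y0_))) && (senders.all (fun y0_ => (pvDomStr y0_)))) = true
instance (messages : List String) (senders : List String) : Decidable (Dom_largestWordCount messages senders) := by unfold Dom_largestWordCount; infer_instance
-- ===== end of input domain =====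

-- B replaces A's three passes (build dict; max of values; selection loop with string max)
-- by ONE loop maintaining the dict together with a running (count, sender) tuple maximum.
-- Equivalence is about the return value; neither version mutates its arguments.

-- ===== PORT A =====
def largestWordCount (messages : List String) (senders : List String) : String :=
  let count := (messages.zip senders).foldl
    (fun d (p : String × String) =>
      d.insert p.2 (d.getD p.2 0 + ((PySem.Str.split₀ p.1).length : Int)))
    PySem.Dict.empty
  match PySem.List.max? count.values (fun v => v) with
  | none => ""   -- Python raises ValueError here (empty dict); excluded by Pre_
  | some maxCount =>
    count.items.foldl (fun ans (p : String × Int) => if p.2 = maxCount then max ans p.1 else ans) ""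

-- ===== PORT B =====
-- Python tuple comparison 'a < b' on (int, str) pairs
def pvLexLt (a b : Int × String) : Bool :=
  decide (a.1 < b.1) || (decide (a.1 = b.1) && decide (a.2 < b.2))

-- 'if best is None or (c, sender) > best: best = (c, sender)'
def pvBestStep (best : Option (Int × String)) (c : Int) (s : String) : Option (Int × String) :=
  match best with
  | none => some (c, s)
  | some b => if pvLexLt b (c, s) then some (c, s) else some b

def largestWordCount_alt (messages : List String) (senders : List String) : String :=
  let st := (messages.zip senders).foldl
    (fun (st : PySem.Dict String Int × Option (Int × String)) (p : String × String) =>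
      let c := st.1.getD p.2 0 + ((PySem.Str.split₀ p.1).length : Int)
      (st.1.insert p.2 c, pvBestStep st.2 c p.2))
    (PySem.Dict.empty, none)
  match st.2 with
  | none => ""   -- Python raises ValueError here; excluded by Pre_
  | some b => b.2

-- ===== PRECONDITION & SPEC =====
-- Pre_ excludes exactly the inputs where zip(messages, senders) is empty: there the dict
-- stays empty and Python A raises ValueError on max() (B raises ValueError too).
def Pre_largestWordCount (messages : List String) (senders : List String) : Prop :=
  messages ≠ [] ∧ senders ≠ []
instance (messages : List String) (senders : List String) : Decidable (Pre_largestWordCount messages senders) := by unfold Pre_largestWordCount; infer_instance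
def pvWitness_largestWordCount : List String × List String := (["hi there"], ["alice"])

def Spec_largestWordCount (messages : List String) (senders : List String) (out : String) : Prop := out = largestWordCount_alt messages senders
instance (messages : List String) (senders : List String) (out : String) : Decidable (Spec_largestWordCount messages senders out) := by unfold Spec_largestWordCount; infer_instance

-- ===== CLAIM (what is proved, stated in full; the proofs are below) =====
def Claim_equal_largestWordCount : Prop := ∀ (messages : List String) (senders : List String), Dom_largestWordCount messages senders → Pre_largestWordCount messages senders → Spec_largestWordCount messages senders (largestWordCount messages senders)

-- ===== LEMMAS AND PROOFS =====

-- A's dict-building step and B's combined step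
def pvStepA (d : PySem.Dict String Int) (p : String × String) : PySem.Dict String Int :=
  d.insert p.2 (d.getD p.2 0 + ((PySem.Str.split₀ p.1).length : Int))

def pvStepB (st : PySem.Dict String Int × Option (Int × String)) (p : String × String) :
    PySem.Dict String Int × Option (Int × String) :=
  let c := st.1.getD p.2 0 + ((PySem.Str.split₀ p.1).length : Int)
  (st.1.insert p.2 c, pvBestStep st.2 c p.2)

-- invariant: best is exactly the strict lex maximum of the swapped items of the dict
def pvInv (d : PySem.Dict String Int) (best : Option (Int × String)) : Prop :=
  d.keys.Nodup ∧
  ((d.items = [] ∧ best = none) ∨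
   ∃ m, best = some m ∧ (m.2, m.1) ∈ d.items ∧
     ∀ p ∈ d.items, p.2 < m.1 ∨ (p.2 = m.1 ∧ p.1 ≤ m.2))

theorem pvInv_step (d : PySem.Dict String Int) (best : Option (Int × String))
    (s : String) (k : Int) (hk : 0 ≤ k) (h : pvInv d best) :
    pvInv (d.insert s (d.getD s 0 + k)) (pvBestStep best (d.getD s 0 + k) s) := by
  obtain ⟨hnd, hcase⟩ := h
  set c := d.getD s 0 + k with hc
  refine ⟨PySem.Dict.nodup_keys_insert _ _ _ hnd, ?_⟩
  rcases hcase with ⟨hit, hbn⟩ | ⟨m, hbm, hmem, hall⟩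
  · subst hbn
    refine Or.inr ⟨(c, s), rfl, PySem.Dict.mem_items_insert_self .., ?_⟩
    intro p hp
    rcases (PySem.Dict.mem_items_insert ..).mp hp with hps | ⟨hpd, _⟩
    · subst hps; exact Or.inr ⟨rfl, le_rfl⟩
    · rw [hit] at hpd; cases hpd
  · obtain ⟨m1, m2⟩ := m
    subst hbm
    have hmem' : (m2, m1) ∈ d.items := hmem
    have hall' : ∀ p ∈ d.items, p.2 < m1 ∨ (p.2 = m1 ∧ p.1 ≤ m2) := hall
    simp only [pvBestStep]
    by_cases hlt : (pvLexLt (m1, m2) (c, s)) = true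
    · rw [if_pos hlt]
      have hlt' : m1 < c ∨ (m1 = c ∧ m2 < s) := by
        simpa [pvLexLt, decide_eq_true_eq] using hlt
      refine Or.inr ⟨(c, s), rfl, PySem.Dict.mem_items_insert_self .., ?_⟩
      intro p hp
      rcases (PySem.Dict.mem_items_insert ..).mp hp with hps | ⟨hpd, hne⟩
      · subst hps; exact Or.inr ⟨rfl, le_rfl⟩
      · rcases hall' p hpd with h1 | ⟨h1, h2⟩ <;> rcases hlt' with h3 | ⟨h3, h4⟩
        · exact Or.inl (h1.trans h3)
        · exact Or.inl (h3 ▸ h1)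
        · exact Or.inl (h1 ▸ h3)
        · exact Or.inr ⟨h1.trans h3, h2.trans h4.le⟩
    · rw [if_neg hlt]
      have hle : c ≤ m1 ∧ (m1 = c → s ≤ m2) := by
        have h' : ¬ (m1 < c ∨ (m1 = c ∧ m2 < s)) := by
          simpa [pvLexLt, decide_eq_true_eq] using hlt
        push Not at h'
        exact ⟨h'.1, h'.2⟩
      by_cases hms : m2 = s
      · have hg : d.getD s 0 = m1 := by
          have hx : (s, m1) ∈ d.items := by rw [← hms]; exact hmem'
          exact PySem.Dict.getD_of_mem_items d hx hnd 0
        have hcm : c = m1 := le_antisymm hle.1 (by rw [hc, ← hg]; omega)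
        refine Or.inr ⟨(m1, m2), rfl, ?_, ?_⟩
        · show (m2, m1) ∈ (d.insert s c).items
          rw [hms, ← hcm]
          exact PySem.Dict.mem_items_insert_self ..
        · intro p hp
          rcases (PySem.Dict.mem_items_insert ..).mp hp with hps | ⟨hpd, _⟩
          · subst hps
            exact Or.inr ⟨hcm, le_of_eq hms.symm⟩
          · exact hall' p hpd
      · refine Or.inr ⟨(m1, m2), rfl,
          (PySem.Dict.mem_items_insert ..).mpr (Or.inr ⟨hmem', hms⟩), ?_⟩
        intro p hp
        rcases (PySem.Dict.mem_items_insert ..).mp hp with hps | ⟨hpd, _⟩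
        · subst hps
          rcases lt_or_eq_of_le hle.1 with h1 | h1
          · exact Or.inl h1
          · exact Or.inr ⟨h1, hle.2 h1.symm⟩
        · exact hall' p hpd

theorem pvfold_fst (zs : List (String × String)) (d : PySem.Dict String Int)
    (b : Option (Int × String)) :
    (zs.foldl pvStepB (d, b)).1 = zs.foldl pvStepA d := by
  induction zs generalizing d b with
  | nil => rfl
  | cons p t ih => exact ih _ _

theorem pvfold_inv (zs : List (String × String)) (d : PySem.Dict String Int)
    (b : Option (Int × String)) (h : pvInv d b) :
    pvInv (zs.foldl pvStepB (d, b)).1 (zs.foldl pvStepB (d, b)).2 := by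
  induction zs generalizing d b with
  | nil => exact h
  | cons p t ih =>
      exact ih _ _ (pvInv_step d b p.2 ((PySem.Str.split₀ p.1).length : Int) (by positivity) h)

theorem pvsel_fix (v : Int) (m2 : String) (l : List (String × Int))
    (hb : ∀ p ∈ l, p.2 = v → p.1 ≤ m2) :
    l.foldl (fun ans p => if p.2 = v then max ans p.1 else ans) m2 = m2 := by
  induction l with
  | nil => rfl
  | cons a t ih =>
      simp only [List.foldl_cons]
      by_cases h : a.2 = v
      · rw [if_pos h, max_eq_left (hb a (by simp) h)]
        exact ih (fun p hp => hb p (by simp [hp]))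
      · rw [if_neg h]; exact ih (fun p hp => hb p (by simp [hp]))

theorem pvsel_eq (v : Int) (m2 : String) (l : List (String × Int)) (init : String)
    (hmem : (m2, v) ∈ l) (hinit : init ≤ m2)
    (hb : ∀ p ∈ l, p.2 = v → p.1 ≤ m2) :
    l.foldl (fun ans p => if p.2 = v then max ans p.1 else ans) init = m2 := by
  induction l generalizing init with
  | nil => cases hmem
  | cons a t ih =>
      simp only [List.foldl_cons]
      rcases List.mem_cons.mp hmem with ha | ht
      · rw [← ha]
        simp only [max_eq_right hinit]
        exact pvsel_fix v m2 t (fun p hp => hb p (by simp [hp]))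
      · by_cases h : a.2 = v
        · rw [if_pos h]
          exact ih _ ht (max_le hinit (hb a (by simp) h))
            (fun p hp => hb p (by simp [hp]))
        · rw [if_neg h]; exact ih _ ht hinit (fun p hp => hb p (by simp [hp]))

-- ===== VERDICT (by name: the statement is the Claim_ definition above) =====
theorem largestWordCount_spec : Claim_equal_largestWordCount := by
  intro messages senders _ _
  unfold Spec_largestWordCount largestWordCount largestWordCount_alt
  have hinv := pvfold_inv (messages.zip senders) PySem.Dict.empty none
    ⟨PySem.Dict.nodup_keys_empty, Or.inl ⟨rfl, rfl⟩⟩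
  have hfst := pvfold_fst (messages.zip senders) PySem.Dict.empty none
  show (match PySem.List.max? ((messages.zip senders).foldl pvStepA PySem.Dict.empty).values (fun v => v) with
        | none => ""
        | some maxCount => ((messages.zip senders).foldl pvStepA PySem.Dict.empty).items.foldl
            (fun ans p => if p.2 = maxCount then max ans p.1 else ans) "")
      = (match ((messages.zip senders).foldl pvStepB (PySem.Dict.empty, none)).2 with
         | none => ""
         | some b => b.2)
  rw [← hfst]
  set st := (messages.zip senders).foldl pvStepB (PySem.Dict.empty, none) with hst
  rcases hinv.2 with ⟨hit, hbn⟩ | ⟨m, hbm, hmem, hall⟩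
  · rw [hbn, hit]
    have : st.1.values = [] := by
      simp only [PySem.Dict.values, hit, List.map_nil]
    rw [this, (PySem.List.max?_eq_none_iff ..).mpr rfl]
  · rw [hbm]
    have hv : m.1 ∈ st.1.values := by
      simp only [PySem.Dict.values]
      exact List.mem_map.mpr ⟨(m.2, m.1), hmem, rfl⟩
    cases hmx : PySem.List.max? st.1.values (fun v => v) with
    | none =>
        rw [(PySem.List.max?_eq_none_iff ..).mp hmx] at hv
        cases hv
    | some v =>
        have h1 : m.1 ≤ v := PySem.List.max?_isMax hmx m.1 hv
        have h2 : v ≤ m.1 := by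
          have hvm : v ∈ st.1.values := PySem.List.max?_mem hmx
          simp only [PySem.Dict.values] at hvm
          obtain ⟨p, hp, hpv⟩ := List.mem_map.mp hvm
          rcases hall p hp with h | ⟨h, _⟩ <;> rw [← hpv] <;> omega
        have hveq : v = m.1 := le_antisymm h2 h1
        show st.1.items.foldl (fun ans p => if p.2 = v then max ans p.1 else ans) "" = m.2
        rw [hveq]
        refine pvsel_eq m.1 m.2 st.1.items "" hmem
          (le_of_not_gt (by simp [String.lt_iff_toList_lt])) ?_
        intro p hp hpv
        rcases hall p hp with h | ⟨_, h⟩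
        · omega
        · exact h
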